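-- pv_equiv track=rewrite | github.com/yxp5/cryptanalysis | vigenere/vigenere.py | everyNthLetters
-- ===== SOURCE A (Python) =====
-- def everyNthLetters(n, text):
--     """
--     int -> str -> bool -> list(str)
--
--     Input: cyclical length (n), string (text)
--     Output: a list of n strings taken from each i*k where i < n and k <= len(text) // n
--
--     Print: none
--     """
--     string_list = []
--     length = len(text)
--     # Max number of whole string of length n in text
--     string_count = length // n
--
--     for i in range(n):
--         string = ""
--         for j in range(string_count):
--             string += text[j*n+i]
--         string_list.append(string)
--
--     return string_list
-- ===== SOURCE B (Python) =====
-- def everyNthLetters(n, text):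
--     # One row-major pass distributing characters into n buckets,
--     # instead of n column-major passes over text.
--     string_count = len(text) // n
--     buckets = [[] for _ in range(n)]
--     for idx in range(len(buckets) * string_count):
--         buckets[idx % n].append(text[idx])
--     return [''.join(b) for b in buckets]
-- ===== Notes on version B (the rewrite author's own statement) =====
-- stated objective: alternative
-- what changed: Replaces A's n column-major passes (one inner loop per output string, indexing j*n+i) by a single row-major linear pass that distributes text[idx] into bucket idx % n, joining the buckets at the end.
import Mathlib
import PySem

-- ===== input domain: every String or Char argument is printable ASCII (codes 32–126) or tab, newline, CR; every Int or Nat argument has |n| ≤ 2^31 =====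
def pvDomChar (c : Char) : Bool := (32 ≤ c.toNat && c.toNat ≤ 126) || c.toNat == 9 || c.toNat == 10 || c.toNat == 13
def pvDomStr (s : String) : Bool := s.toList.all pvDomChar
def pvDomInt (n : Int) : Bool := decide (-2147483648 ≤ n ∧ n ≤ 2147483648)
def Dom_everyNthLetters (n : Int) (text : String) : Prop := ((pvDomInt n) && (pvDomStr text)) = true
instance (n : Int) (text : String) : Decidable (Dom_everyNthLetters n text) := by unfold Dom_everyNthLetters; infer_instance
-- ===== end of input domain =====

-- B replaces A's n column-major passes by a single row-major pass into n buckets (alternative decomposition, same cost).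


-- ===== PORT A =====
-- for i in range(n): build string by j-loop over text[j*n+i]; index always in range under Pre_ (n ≠ 0),
-- so pyGetD with a default character is exact there.
def everyNthLetters (n : Int) (text : String) : List String :=
  let cs := text.toList
  let length : Int := (cs.length : Int)
  let string_count := PySem.Int.floordiv length n
  (PySem.List.pyRange 0 n 1).foldl
    (fun string_list i =>
      let s : List Char :=
        (PySem.List.pyRange 0 string_count 1).foldl
          (fun s j => s ++ [PySem.List.pyGetD cs (j * n + i) ' ']) []
      string_list ++ [String.mk s]) []

-- ===== PORT B =====
-- buckets[idx % n].append(text[idx]) : with n > 0 the residue idx % n lies in [0, n), so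
-- List.modify at (mod idx n).toNat is exactly Python's in-range list mutation; ''.join(b) on a
-- list of single characters is String.mk.
def everyNthLetters_alt (n : Int) (text : String) : List String :=
  let cs := text.toList
  let string_count := PySem.Int.floordiv (cs.length : Int) n
  let buckets : List (List Char) := (PySem.List.pyRange 0 n 1).map (fun _ => [])
  let final :=
    (PySem.List.pyRange 0 ((buckets.length : Int) * string_count) 1).foldl
      (fun bs idx => bs.modify (PySem.Int.mod idx n).toNat
        (fun b => b ++ [PySem.List.pyGetD cs idx ' '])) buckets
  final.map String.mk

-- ===== PRECONDITION & SPEC =====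
-- Python A raises ZeroDivisionError on n = 0; that is the only excluded input.
def Pre_everyNthLetters (n : Int) (text : String) : Prop := n ≠ 0
instance (n : Int) (text : String) : Decidable (Pre_everyNthLetters n text) := by
  unfold Pre_everyNthLetters; infer_instance
def pvWitness_everyNthLetters : Int × String := (2, "abcd")
def Spec_everyNthLetters (n : Int) (text : String) (out : List String) : Prop := out = everyNthLetters_alt n text
instance (n : Int) (text : String) (out : List String) : Decidable (Spec_everyNthLetters n text out) := by unfold Spec_everyNthLetters; infer_instance

-- ===== CLAIM (what is proved, stated in full; the proofs are below) =====
def Claim_equal_everyNthLetters : Prop := ∀ (n : Int) (text : String), Dom_everyNthLetters n text → Pre_everyNthLetters n text → Spec_everyNthLetters n text (everyNthLetters n text)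

-- ===== LEMMAS AND PROOFS =====

-- A fold appending one element per item is a map.
theorem pv_foldl_append_singleton {α β : Type} (f : α → β) :
    ∀ (l : List α) (acc : List β),
      l.foldl (fun r x => r ++ [f x]) acc = acc ++ l.map f := by
  intro l
  induction l with
  | nil => simp
  | cons x xs ih => intro acc; simp [List.foldl, ih]

-- Bucket k of the distribution fold = its start plus the images of the indices with residue k.
theorem pv_foldl_modify_getElem? {n : Int} (g : Int → Char) (k : Nat) :
    ∀ (l : List Int) (bs : List (List Char)),
      (l.foldl (fun bs idx => bs.modify (PySem.Int.mod idx n).toNat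
        (fun b => b ++ [g idx])) bs)[k]? =
      (bs[k]?).map (fun b => b ++ (l.filter (fun idx =>
        decide ((PySem.Int.mod idx n).toNat = k))).map g) := by
  intro l
  induction l with
  | nil => intro bs; simp
  | cons x xs ih =>
    intro bs
    simp only [List.foldl_cons, ih, List.getElem?_modify, List.filter_cons]
    by_cases h : (PySem.Int.mod x n).toNat = k
    · simp only [h, if_pos rfl]
      cases bs[k]? <;> simp [h]
    · simp only [h]
      cases bs[k]? <;> simp [h]

-- In a range of Nats, filtering on equality with k < m keeps exactly [k].
theorem pv_filter_range_eq (k : Nat) :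
    ∀ (m : Nat), k < m → (List.range m).filter (fun t => decide (t = k)) = [k] := by
  intro m
  induction m with
  | zero => omega
  | succ m ih =>
    intro hk
    rw [List.range_succ, List.filter_append]
    by_cases h : k < m
    · rw [ih h]
      simp; omega
    · have hkm : k = m := by omega
      subst hkm
      have h0 : (List.range k).filter (fun t => decide (t = k)) = [] := by
        rw [List.filter_eq_nil_iff]
        intro a ha
        simp only [List.mem_range] at ha
        simp only [decide_eq_true_eq]
        omega
      simp [h0]

-- Filtering one full row [a*n, a*n+n) by residue k keeps exactly a*n+k.
theorem pv_filter_row (n : Int) (hn : 0 < n) (k : Nat) (hk : (k : Int) < n) (a : Int) :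
    (PySem.List.pyRange (a * n) (a * n + n) 1).filter (fun idx =>
      decide ((PySem.Int.mod idx n).toNat = k)) = [a * n + (k : Int)] := by
  rw [PySem.List.pyRange_one]
  have hlen : (a * n + n - a * n).toNat = n.toNat := by omega
  rw [hlen, List.filter_map]
  have hfc : ∀ t ∈ List.range n.toNat,
      ((fun idx => decide ((PySem.Int.mod idx n).toNat = k)) ∘ (fun t : Nat => a * n + (t : Int))) t
        = (fun t => decide (t = k)) t := by
    intro t ht
    simp only [List.mem_range] at ht
    have hmod : PySem.Int.mod (a * n + (t : Int)) n = (t : Int) := by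
      rw [PySem.Int.mod_eq_emod_of_pos hn]
      have ht' : (t : Int) < n := by omega
      have hstep : (a * n + (t : Int)) % n = (t : Int) % n := by
        rw [mul_comm a n, add_comm]
        exact Int.add_mul_emod_self_left (↑t) n a
      rw [hstep]
      exact Int.emod_eq_of_lt (by positivity) ht'
    simp [Function.comp, hmod]
  rw [List.filter_congr hfc, pv_filter_range_eq k n.toNat (by omega)]
  simp

-- Filtering the whole range [0, n*c) by residue k keeps exactly the column j*n+k, j < c.
theorem pv_filter_pyRange (n : Int) (hn : 0 < n) (k : Nat) (hk : (k : Int) < n) :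
    ∀ (c : Nat),
      (PySem.List.pyRange 0 (n * (c : Int)) 1).filter (fun idx =>
        decide ((PySem.Int.mod idx n).toNat = k)) =
      (PySem.List.pyRange 0 (c : Int) 1).map (fun j => j * n + (k : Int)) := by
  intro c
  induction c with
  | zero =>
    rw [PySem.List.pyRange_one_eq_nil (by simp), PySem.List.pyRange_one_eq_nil (by simp)]
    simp
  | succ c ih =>
    have h1 : (0 : Int) ≤ n * (c : Int) := by positivity
    have h2 : n * (c : Int) ≤ n * ((c : Int) + 1) := by nlinarith
    have hsplit : PySem.List.pyRange 0 (n * ((c : Int) + 1)) 1 =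
        PySem.List.pyRange 0 (n * (c : Int)) 1 ++
        PySem.List.pyRange (n * (c : Int)) (n * ((c : Int) + 1)) 1 :=
      PySem.List.pyRange_one_append 0 (n * (c : Int)) (n * ((c : Int) + 1)) h1 h2
    have hrow : PySem.List.pyRange (n * (c : Int)) (n * ((c : Int) + 1)) 1 =
        PySem.List.pyRange ((c : Int) * n) ((c : Int) * n + n) 1 := by ring_nf
    have hcol : PySem.List.pyRange 0 ((c : Int) + 1) 1 =
        PySem.List.pyRange 0 (c : Int) 1 ++ [(c : Int)] :=
      PySem.List.pyRange_one_succ_right (by omega)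
    push_cast
    rw [hsplit, List.filter_append, ih, hrow,
        pv_filter_row n hn k hk (c : Int), hcol]
    simp

theorem everyNthLetters_eq_alt (n : Int) (text : String) (hn : n ≠ 0) :
    everyNthLetters n text = everyNthLetters_alt n text := by
  unfold everyNthLetters everyNthLetters_alt
  by_cases hpos : 0 < n
  · -- n > 0
    set cs := text.toList with hcs
    set sc := PySem.Int.floordiv (cs.length : Int) n with hsc
    have hsc0 : 0 ≤ sc := by
      rw [hsc]
      have : n = ((n.toNat : Nat) : Int) := by omega
      rw [this, PySem.Int.floordiv_natCast]
      positivity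
    set g : Int → Char := fun idx => PySem.List.pyGetD cs idx ' ' with hg
    -- A side: a map over the column indices
    rw [pv_foldl_append_singleton]
    simp only [List.nil_append]
    have hA : ∀ i : Int,
        (PySem.List.pyRange 0 sc 1).foldl (fun s j => s ++ [g (j * n + i)]) [] =
        (PySem.List.pyRange 0 sc 1).map (fun j => g (j * n + i)) := by
      intro i; rw [pv_foldl_append_singleton]; simp
    -- B side: pointwise description of the buckets
    set bs0 : List (List Char) := (PySem.List.pyRange 0 n 1).map (fun _ => ([] : List Char))
      with hbs0
    have hlen0 : bs0.length = n.toNat := by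
      rw [hbs0, List.length_map, PySem.List.length_pyRange_one]; omega
    set L := PySem.List.pyRange 0 ((bs0.length : Int) * sc) 1 with hL
    set F := L.foldl (fun bs idx => bs.modify (PySem.Int.mod idx n).toNat
      (fun b => b ++ [g idx])) bs0 with hF
    have hlenF : F.length = n.toNat := by
      rw [hF]
      have : ∀ (l : List Int) (bs : List (List Char)),
          (l.foldl (fun bs idx => bs.modify (PySem.Int.mod idx n).toNat
            (fun b => b ++ [g idx])) bs).length = bs.length := by
        intro l
        induction l with
        | nil => intro bs; rfl
        | cons x xs ih => intro bs; simp [List.foldl_cons, ih]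
      rw [this, hlen0]
    apply List.ext_getElem?
    intro k
    by_cases hk : k < n.toNat
    · have hkn : (k : Int) < n := by omega
      rw [List.getElem?_map, List.getElem?_map]
      have hR : (PySem.List.pyRange 0 n 1)[k]? = some ((k : Int)) := by
        rw [PySem.List.getElem?_pyRange_one] <;> simp <;> omega
      rw [hR]
      have hFk : F[k]? = some ((PySem.List.pyRange 0 sc 1).map (fun j => g (j * n + (k : Int)))) := by
        rw [hF, pv_foldl_modify_getElem? g k]
        have hbk : bs0[k]? = some ([] : List Char) := by
          rw [hbs0, List.getElem?_map]
          rw [hR]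
          rfl
        rw [hbk]
        have hLrw : L = PySem.List.pyRange 0 (n * sc) 1 := by
          have hnn : ((n.toNat : Nat) : Int) = n := by omega
          rw [hL, hlen0, hnn]
        rw [hLrw]
        have hsceq : sc = ((sc.toNat : Nat) : Int) := by omega
        rw [hsceq, pv_filter_pyRange n hpos k hkn sc.toNat]
        simp [List.map_map, Function.comp]
      rw [hFk]
      simp only [Option.map_some, Option.some_inj]
      congr 1
      rw [← hsc,
        pv_foldl_append_singleton (fun j => PySem.List.pyGetD cs (j * n + (k : Int)) ' ')]
      simp [hg]
    · -- out of range on both sides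
      have h1 : ((PySem.List.pyRange 0 n 1).map (fun i =>
          String.mk ((PySem.List.pyRange 0 sc 1).foldl (fun s j => s ++ [g (j * n + i)]) [])))[k]? = none := by
        rw [List.getElem?_eq_none]
        rw [List.length_map, PySem.List.length_pyRange_one]; omega
      have h2 : (F.map String.mk)[k]? = none := by
        rw [List.getElem?_eq_none]
        rw [List.length_map, hlenF]; omega
      rw [h1, h2]
  · -- n < 0 : both return []
    have hneg : n < 0 := by omega
    have h1 : PySem.List.pyRange 0 n 1 = [] := PySem.List.pyRange_one_eq_nil (by omega)
    simp only [h1, List.foldl_nil, List.map_nil, List.length_nil]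
    have h2 : PySem.List.pyRange 0 ((0 : Int) * PySem.Int.floordiv (text.toList.length : Int) n) 1 = [] := by
      rw [zero_mul]
      exact PySem.List.pyRange_one_eq_nil (by omega)
    simp [h2]

-- ===== VERDICT (by name: the statement is the Claim_ definition above) =====
theorem everyNthLetters_spec : Claim_equal_everyNthLetters := by
  intro n text _ hpre
  exact everyNthLetters_eq_alt n text hpre
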